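-- pv_equiv track=rewrite | github.com/mohamedlandolsi/gtm-intelligence-platform | processing/markdown_report_generator.py | _extract_gaps
-- ===== SOURCE A (Python) =====
-- from typing import Dict, List, Any, Optional
--
-- def _extract_gaps(
--     signals: List[Dict[str, Any]],
--     insights: Dict[str, Any]
-- ) -> List[Dict[str, str]]:
--     """Extract potential gaps and vulnerabilities."""
--     gaps = []
--
--     # Look for missing categories
--     categories_present = set(s.get('primary_category') for s in signals)
--
--     if 'COMPETITIVE' not in categories_present or len([s for s in signals if s.get('primary_category') == 'COMPETITIVE']) < 2:
--         gaps.append({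
--             'title': 'Limited Competitive Intelligence Visibility',
--             'description': 'Few competitive positioning signals may indicate reactive rather than proactive competitive strategy.'
--         })
--
--     if 'MESSAGING' not in categories_present or len([s for s in signals if s.get('primary_category') == 'MESSAGING']) < 2:
--         gaps.append({
--             'title': 'Messaging Strategy Opportunities',
--             'description': 'Limited public messaging signals create opportunities for competitors to shape market narrative.'
--         })
--
--     # Large organization challenges
--     talent_signals = [s for s in signals if s.get('primary_category') == 'TALENT']
--     employee_counts = [s for s in talent_signals if 'employees' in s.get('headline', '').lower()]
--     if employee_counts:
--         gaps.append({
--             'title': 'Organizational Complexity',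
--             'description': 'Large organizational scale may create slower decision-making and reduced agility compared to smaller competitors.'
--         })
--
--     return gaps[:4]  # Top 4 gaps
-- ===== SOURCE B (Python) =====
-- from typing import Dict, List, Any
--
-- def _extract_gaps(
--     signals: List[Dict[str, Any]],
--     insights: Dict[str, Any]
-- ) -> List[Dict[str, str]]:
--     """Extract potential gaps and vulnerabilities (single pass over signals)."""
--     competitive = 0
--     messaging = 0
--     has_employee_talent = False
--     for s in signals:
--         cat = s.get('primary_category')
--         if cat == 'COMPETITIVE':
--             competitive += 1
--         elif cat == 'MESSAGING':
--             messaging += 1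
--         elif cat == 'TALENT' and 'employees' in s.get('headline', '').lower():
--             has_employee_talent = True
--     gaps = []
--     if competitive < 2:
--         gaps.append({
--             'title': 'Limited Competitive Intelligence Visibility',
--             'description': 'Few competitive positioning signals may indicate reactive rather than proactive competitive strategy.'
--         })
--     if messaging < 2:
--         gaps.append({
--             'title': 'Messaging Strategy Opportunities',
--             'description': 'Limited public messaging signals create opportunities for competitors to shape market narrative.'
--         })
--     if has_employee_talent:
--         gaps.append({
--             'title': 'Organizational Complexity',
--             'description': 'Large organizational scale may create slower decision-making and reduced agility compared to smaller competitors.'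
--         })
--     return gaps
-- ===== Notes on version B (the rewrite author's own statement) =====
-- stated objective: alternative
-- what changed: Replaced the categories-set plus three separate full-list comprehensions (membership test, two per-category filters, talent filter then headline filter) by a single pass over signals maintaining two counters and a boolean flag, using that an absent category means count 0 < 2; the gaps list has at most 3 entries so the [:4] slice is dropped.
import Mathlib
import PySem

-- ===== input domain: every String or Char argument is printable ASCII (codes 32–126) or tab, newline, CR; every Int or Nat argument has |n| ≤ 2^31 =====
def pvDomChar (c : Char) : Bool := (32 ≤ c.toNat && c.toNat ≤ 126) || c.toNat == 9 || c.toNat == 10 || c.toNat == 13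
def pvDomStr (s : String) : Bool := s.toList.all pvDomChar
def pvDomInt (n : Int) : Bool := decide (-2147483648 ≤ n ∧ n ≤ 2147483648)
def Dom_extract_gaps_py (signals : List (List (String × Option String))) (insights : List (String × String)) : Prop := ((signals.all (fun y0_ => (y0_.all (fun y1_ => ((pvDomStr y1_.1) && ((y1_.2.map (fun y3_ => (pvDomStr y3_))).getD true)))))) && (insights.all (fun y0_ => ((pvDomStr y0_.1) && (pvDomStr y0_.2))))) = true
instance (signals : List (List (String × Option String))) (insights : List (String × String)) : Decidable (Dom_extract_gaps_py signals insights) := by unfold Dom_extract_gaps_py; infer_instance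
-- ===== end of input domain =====

-- B replaces A's categories-set and three separate list comprehensions over `signals` by one
-- pass keeping two counters and a flag (objective: alternative — one traversal instead of several).
-- Shared literal gap dictionaries and the transliterations of `s.get(...)`:
def pvGapCompetitive : List (String × String) :=
  [("title", "Limited Competitive Intelligence Visibility"),
   ("description", "Few competitive positioning signals may indicate reactive rather than proactive competitive strategy.")]
def pvGapMessaging : List (String × String) :=
  [("title", "Messaging Strategy Opportunities"),
   ("description", "Limited public messaging signals create opportunities for competitors to shape market narrative.")]
def pvGapOrg : List (String × String) :=
  [("title", "Organizational Complexity"),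
   ("description", "Large organizational scale may create slower decision-making and reduced agility compared to smaller competitors.")]

-- s.get('primary_category')  (absent key and stored None both give None)
def pvCat (s : List (String × Option String)) : Option String :=
  ((PySem.Dict.mk s).get? "primary_category").getD none
-- s.get('headline', ''); a stored None (inner `none`) makes Python raise AttributeError on
-- .lower() — those inputs are excluded by Pre_; the total form uses "" there.
def pvHeadline (s : List (String × Option String)) : String :=
  (((PySem.Dict.mk s).get? "headline").getD (some "")).getD ""
-- 'employees' in s.get('headline','').lower()
def pvEmp (s : List (String × Option String)) : Bool :=
  PySem.Str.isIn "employees" (PySem.Str.lower (pvHeadline s))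

-- ===== PORT A =====
def extract_gaps_py (signals : List (List (String × Option String))) (insights : List (String × String)) : List (List (String × String)) :=
  let gaps : List (List (String × String)) := []
  let categories_present : PySem.Set (Option String) := PySem.Set.ofList (signals.map pvCat)
  let gaps := if ¬ (PySem.Set.contains categories_present (some "COMPETITIVE") = true)
                 ∨ (signals.filter (fun s => pvCat s == some "COMPETITIVE")).length < 2
              then gaps ++ [pvGapCompetitive] else gaps
  let gaps := if ¬ (PySem.Set.contains categories_present (some "MESSAGING") = true)
                 ∨ (signals.filter (fun s => pvCat s == some "MESSAGING")).length < 2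
              then gaps ++ [pvGapMessaging] else gaps
  let talent_signals := signals.filter (fun s => pvCat s == some "TALENT")
  let employee_counts := talent_signals.filter pvEmp
  let gaps := if employee_counts ≠ [] then gaps ++ [pvGapOrg] else gaps
  PySem.List.slice gaps none (some 4)

-- ===== PORT B =====
-- the single for-loop of Source B over signals, state (competitive, messaging, has_employee_talent)
def pvLoopB : List (List (String × Option String)) → Int × Int × Bool → Int × Int × Bool
  | [], st => st
  | s :: rest, (c, m, e) =>
    let cat := pvCat s
    if cat == some "COMPETITIVE" then pvLoopB rest (c + 1, m, e)
    else if cat == some "MESSAGING" then pvLoopB rest (c, m + 1, e)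
    else if cat == some "TALENT" && pvEmp s then pvLoopB rest (c, m, true)
    else pvLoopB rest (c, m, e)

def extract_gaps_py_alt (signals : List (List (String × Option String))) (insights : List (String × String)) : List (List (String × String)) :=
  let st := pvLoopB signals (0, 0, false)
  let gaps : List (List (String × String)) := []
  let gaps := if st.1 < 2 then gaps ++ [pvGapCompetitive] else gaps
  let gaps := if st.2.1 < 2 then gaps ++ [pvGapMessaging] else gaps
  let gaps := if st.2.2 then gaps ++ [pvGapOrg] else gaps
  gaps

-- ===== PRECONDITION & SPEC =====
-- Pre_ excludes exactly the inputs on which Python A raises AttributeError: a signal of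
-- category 'TALENT' whose dict stores None under 'headline' (None.lower()). B raises there too.
def Pre_extract_gaps_py (signals : List (List (String × Option String))) (insights : List (String × String)) : Prop :=
  ∀ s ∈ signals, pvCat s = some "TALENT" → ((PySem.Dict.mk s).get? "headline").getD (some "") ≠ none
instance (signals : List (List (String × Option String))) (insights : List (String × String)) : Decidable (Pre_extract_gaps_py signals insights) := by unfold Pre_extract_gaps_py; infer_instance
def pvWitness_extract_gaps_py : (List (List (String × Option String))) × (List (String × String)) :=
  ([[("primary_category", some "TALENT"), ("headline", some "500 Employees")]], [])

def Spec_extract_gaps_py (signals : List (List (String × Option String))) (insights : List (String × String)) (out : List (List (String × String))) : Prop := out = extract_gaps_py_alt signals insights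
instance (signals : List (List (String × Option String))) (insights : List (String × String)) (out : List (List (String × String))) : Decidable (Spec_extract_gaps_py signals insights out) := by unfold Spec_extract_gaps_py; infer_instance

-- ===== CLAIM (what is proved, stated in full; the proofs are below) =====
def Claim_equal_extract_gaps_py : Prop := ∀ (signals : List (List (String × Option String))) (insights : List (String × String)), Dom_extract_gaps_py signals insights → Pre_extract_gaps_py signals insights → Spec_extract_gaps_py signals insights (extract_gaps_py signals insights)

-- ===== LEMMAS AND PROOFS =====

-- B's loop computes the two category counts and the employees-flag of the remaining list.
lemma pvLoopB_eq (signals : List (List (String × Option String))) (c m : Int) (e : Bool) :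
    pvLoopB signals (c, m, e) =
      (c + (signals.countP (fun s => pvCat s == some "COMPETITIVE") : Int),
       m + (signals.countP (fun s => pvCat s == some "MESSAGING") : Int),
       e || signals.any (fun s => pvCat s == some "TALENT" && pvEmp s)) := by
  induction signals generalizing c m e with
  | nil => simp [pvLoopB]
  | cons s rest ih =>
    simp only [pvLoopB, List.countP_cons, List.any_cons]
    by_cases h1 : pvCat s = some "COMPETITIVE"
    · simp [h1, ih]; ring
    · by_cases h2 : pvCat s = some "MESSAGING"
      · simp [h2, ih]; ring
      · by_cases h3 : pvCat s = some "TALENT" ∧ pvEmp s = true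
        · simp [h3.1, h3.2, ih]
        · have h3' : (pvCat s == some "TALENT" && pvEmp s) = false := by
            rcases Decidable.not_and_iff_not_or_not.mp h3 with h | h <;> simp_all
          simp [h1, h2, h3', ih]

-- A's membership-or-few-signals condition is exactly "count < 2".
lemma pvCond_iff (signals : List (List (String × Option String))) (cat : String) :
    (¬ (PySem.Set.contains (PySem.Set.ofList (signals.map pvCat)) (some cat) = true)
       ∨ (signals.filter (fun s => pvCat s == some cat)).length < 2)
    ↔ signals.countP (fun s => pvCat s == some cat) < 2 := by
  rw [← List.countP_eq_length_filter]
  constructor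
  · rintro (h | h)
    · have : signals.countP (fun s => pvCat s == some cat) = 0 := by
        rw [List.countP_eq_zero]
        intro s hs
        simp only [beq_iff_eq]
        intro hc
        exact h (by simp [PySem.Set.contains, PySem.Set.mem_ofList, List.mem_map]
                    exact ⟨s, hs, hc⟩)
      omega
    · exact h
  · exact fun h => Or.inr h

-- A's nonempty double filter is exactly B's any-flag.
lemma pvEmp_iff (signals : List (List (String × Option String))) :
    (signals.filter (fun s => pvCat s == some "TALENT")).filter pvEmp ≠ []
    ↔ signals.any (fun s => pvCat s == some "TALENT" && pvEmp s) = true := by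
  rw [Ne, List.filter_eq_nil_iff, List.any_eq_true]
  simp only [not_forall, not_not, exists_prop]
  constructor
  · rintro ⟨s, hs, hp⟩
    have := List.mem_filter.mp hs
    exact ⟨s, this.1, by simp [this.2, hp]⟩
  · rintro ⟨s, hs, hp⟩
    have hp' := Bool.and_eq_true_iff.mp hp
    exact ⟨s, List.mem_filter.mpr ⟨hs, hp'.1⟩, hp'.2⟩

-- ===== VERDICT (by name: the statement is the Claim_ definition above) =====
set_option maxHeartbeats 1000000 in
theorem extract_gaps_py_spec : Claim_equal_extract_gaps_py := by
  intro signals insights _ _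
  have hcast : ∀ n : Nat, (((0:Int) + (n:Int)) < 2 ↔ n < 2) := by intro n; omega
  simp only [Spec_extract_gaps_py, extract_gaps_py, extract_gaps_py_alt]
  rw [pvLoopB_eq]
  simp only [pvCond_iff, pvEmp_iff, hcast, Bool.false_or]
  split_ifs <;> rfl
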